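-- pv_equiv track=rewrite | github.com/Maaslalaniii/ProgrammingProblems | TandemBicycle/tandem_bicycle.py | tandem
-- ===== SOURCE A (Python) =====
-- def tandem(Q, N, D, P):
--
--   # Lists of the pairs on each tandem bicycle
--   bicycles = []
--
--   for i in range(0, N):
--
--     # Depending on the question, pair the fastest speed from Dmojistan
--     # with the fastest or slowest speed from Pegland.
--     d = max(D)
--     p = min(P) if Q == 1 else max(P)
--
--     # Remove the two from the unpaired lists, to avoid reselection.
--     D.remove(d)
--     P.remove(p)
--
--     # Add the pair to a tandem bicycle.
--     bicycles.append([d, p])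
--
--   # Finds total speed by adding the speeds of all the bicycles.
--   total_speed = 0
--   for bicycle in bicycles:
--     total_speed = total_speed + max(bicycle)
--
--   return total_speed
-- ===== SOURCE B (Python) =====
-- def tandem(Q, N, D, P):
--     # Sort once instead of repeatedly scanning for max/min: pair the i-th
--     # fastest of D with the i-th slowest (Q==1) or i-th fastest of P.
--     # Note: A mutates D and P in place (removes N elements from each);
--     # B leaves them untouched -- the equivalence is about the return value.
--     n = max(N, 0)
--     Ds = sorted(D, reverse=True)[:n]
--     Ps = sorted(P, reverse=(Q != 1))[:n]
--     return sum(max(d, p) for d, p in zip(Ds, Ps))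
-- ===== Notes on version B (the rewrite author's own statement) =====
-- stated objective: faster
-- what changed: Replaced the N repeated max/min scans with removal (O(N^2)) by sorting D descending and P ascending/descending once and pairing the prefixes in order; also B does not mutate D and P, equivalence is about the return value.
import Mathlib
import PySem

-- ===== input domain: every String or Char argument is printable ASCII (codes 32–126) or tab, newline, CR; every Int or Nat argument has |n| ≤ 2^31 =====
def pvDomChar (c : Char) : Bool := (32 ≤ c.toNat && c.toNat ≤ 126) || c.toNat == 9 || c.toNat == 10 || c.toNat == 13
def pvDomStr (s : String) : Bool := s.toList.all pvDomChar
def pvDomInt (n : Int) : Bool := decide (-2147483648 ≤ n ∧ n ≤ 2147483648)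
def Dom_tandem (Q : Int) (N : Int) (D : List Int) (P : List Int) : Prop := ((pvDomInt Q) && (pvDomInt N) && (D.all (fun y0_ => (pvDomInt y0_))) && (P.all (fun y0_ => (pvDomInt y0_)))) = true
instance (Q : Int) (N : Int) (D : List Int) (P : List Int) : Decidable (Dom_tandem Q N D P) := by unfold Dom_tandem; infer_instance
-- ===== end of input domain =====

-- B sorts each list once and pairs the prefixes instead of A's repeated max/min scan+remove
-- (O(N log N) vs O(N^2)); A mutates D and P in place, B does not — the claim is about the return value.

-- ===== PORT A =====
-- the for-loop over range(0, N): state is the current D, P and the bicycles list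
def tandemLoop (Q : Int) : Nat → List Int → List Int → List (Int × Int) → List (Int × Int)
  | 0, _, _, bikes => bikes
  | n + 1, D, P, bikes =>
    match PySem.List.max? D (fun x => x),
          (if Q = 1 then PySem.List.min? P (fun x => x) else PySem.List.max? P (fun x => x)) with
    | some d, some p =>
      match PySem.List.remove? D d, PySem.List.remove? P p with
      | some D', some P' => tandemLoop Q n D' P' (bikes ++ [(d, p)])
      | _, _ => bikes            -- unreachable inside Pre_ (Python raises ValueError there)
    | _, _ => bikes              -- unreachable inside Pre_ (max/min of empty list raises)

def tandem (Q : Int) (N : Int) (D : List Int) (P : List Int) : Int :=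
  let bikes := tandemLoop Q N.toNat D P []
  bikes.foldl (fun acc b => acc + max b.1 b.2) 0   -- max(bicycle) of the 2-element list [d, p]

-- ===== PORT B =====
def tandem_alt (Q : Int) (N : Int) (D : List Int) (P : List Int) : Int :=
  let n := max N 0
  let Ds := PySem.List.slice (PySem.List.sorted D (fun x => x) true) none (some n)
  let Ps := PySem.List.slice (PySem.List.sorted P (fun x => x) (decide ¬ (Q = 1))) none (some n)
  ((Ds.zip Ps).map (fun dp => max dp.1 dp.2)).sum

-- ===== PRECONDITION & SPEC =====
-- A raises ValueError (max/min of an empty list) as soon as the loop outruns either list: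
-- Pre_ admits exactly the inputs with N ≤ len(D) and N ≤ len(P).
def Pre_tandem (Q : Int) (N : Int) (D : List Int) (P : List Int) : Prop :=
  N ≤ (D.length : Int) ∧ N ≤ (P.length : Int)
instance (Q : Int) (N : Int) (D : List Int) (P : List Int) : Decidable (Pre_tandem Q N D P) := by unfold Pre_tandem; infer_instance

def pvWitness_tandem : Int × Int × List Int × List Int := (1, 2, [3, 1, 2], [5, 4])

def Spec_tandem (Q : Int) (N : Int) (D : List Int) (P : List Int) (out : Int) : Prop := out = tandem_alt Q N D P
instance (Q : Int) (N : Int) (D : List Int) (P : List Int) (out : Int) : Decidable (Spec_tandem Q N D P out) := by unfold Spec_tandem; infer_instance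

-- ===== CLAIM (what is proved, stated in full; the proofs are below) =====
def Claim_equal_tandem : Prop := ∀ (Q : Int) (N : Int) (D : List Int) (P : List Int), Dom_tandem Q N D P → Pre_tandem Q N D P → Spec_tandem Q N D P (tandem Q N D P)

-- ===== LEMMAS AND PROOFS =====

-- a descending-sorted list is determined by the multiset of its elements
theorem sortedDesc_eq_of_perm (xs ys : List Int) (h : xs.Perm ys) :
    PySem.List.sorted xs (fun x => x) true = PySem.List.sorted ys (fun x => x) true := by
  refine List.Perm.eq_of_pairwise (le := fun a b : Int => b ≤ a)
    (fun a b _ _ h1 h2 => le_antisymm h2 h1)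
    (PySem.List.sorted_pairwise_rev xs (fun x => x))
    (PySem.List.sorted_pairwise_rev ys (fun x => x))
    (((PySem.List.sorted_perm xs (fun x => x) true).trans h).trans
      (PySem.List.sorted_perm ys (fun x => x) true).symm)

theorem sortedAsc_eq_of_perm (xs ys : List Int) (h : xs.Perm ys) :
    PySem.List.sorted xs (fun x => x) false = PySem.List.sorted ys (fun x => x) false := by
  refine List.Perm.eq_of_pairwise (le := fun a b : Int => a ≤ b)
    (fun a b _ _ h1 h2 => le_antisymm h1 h2)
    (PySem.List.sorted_pairwise xs (fun x => x))
    (PySem.List.sorted_pairwise ys (fun x => x))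
    (((PySem.List.sorted_perm xs (fun x => x) false).trans h).trans
      (PySem.List.sorted_perm ys (fun x => x) false).symm)

-- extracting max(D) and erasing it peels the head of sorted(D, reverse=True)
theorem desc_head (D : List Int) (d : Int) (h : PySem.List.max? D (fun x => x) = some d) :
    PySem.List.sorted D (fun x => x) true
      = d :: PySem.List.sorted (D.erase d) (fun x => x) true := by
  have hmem : d ∈ D := PySem.List.max?_mem h
  have hD : D ≠ [] := by intro hn; subst hn; simp at hmem
  obtain ⟨m, T, hS⟩ : ∃ m T, PySem.List.sorted D (fun x => x) true = m :: T := by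
    cases hE : PySem.List.sorted D (fun x => x) true with
    | nil => exact absurd ((PySem.List.sorted_eq_nil_iff _ _ _).mp hE) hD
    | cons m T => exact ⟨m, T, rfl⟩
  have hmD : m ∈ D := by
    have := (PySem.List.mem_sorted (xs := D) (key := fun x => x) (rev := true) (x := m)).mp
    simp [hS] at this; exact this
  have hmd : m = d := le_antisymm (PySem.List.max?_isMax h m hmD)
    (PySem.List.key_head_sorted_rev_ge D (fun x => x) hS d hmem)
  subst hmd
  have hperm : T.Perm (D.erase m) := by
    have h1 : (m :: T).Perm D := hS ▸ PySem.List.sorted_perm D (fun x => x) true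
    have h2 : D.Perm (m :: D.erase m) := List.perm_cons_erase hmem
    exact (h1.trans h2).cons_inv
  have hT : PySem.List.sorted T (fun x => x) true = T := by
    apply PySem.List.sorted_rev_eq_self_of_pairwise
    have := PySem.List.sorted_pairwise_rev D (fun x => x)
    rw [hS] at this; exact this.of_cons
  rw [hS, ← hT, sortedDesc_eq_of_perm T (D.erase m) hperm]

-- extracting min(P) and erasing it peels the head of sorted(P)
theorem asc_head (P : List Int) (p : Int) (h : PySem.List.min? P (fun x => x) = some p) :
    PySem.List.sorted P (fun x => x) false
      = p :: PySem.List.sorted (P.erase p) (fun x => x) false := by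
  have hmem : p ∈ P := PySem.List.min?_mem h
  have hP : P ≠ [] := by intro hn; subst hn; simp at hmem
  obtain ⟨m, T, hS⟩ : ∃ m T, PySem.List.sorted P (fun x => x) false = m :: T := by
    cases hE : PySem.List.sorted P (fun x => x) false with
    | nil => exact absurd ((PySem.List.sorted_eq_nil_iff _ _ _).mp hE) hP
    | cons m T => exact ⟨m, T, rfl⟩
  have hmP : m ∈ P := by
    have := (PySem.List.mem_sorted (xs := P) (key := fun x => x) (rev := false) (x := m)).mp
    simp [hS] at this; exact this
  have hmd : m = p := le_antisymm (PySem.List.key_head_sorted_le P (fun x => x) hS p hmem)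
    (PySem.List.min?_isMin h m hmP)
  subst hmd
  have hperm : T.Perm (P.erase m) := by
    have h1 : (m :: T).Perm P := hS ▸ PySem.List.sorted_perm P (fun x => x) false
    have h2 : P.Perm (m :: P.erase m) := List.perm_cons_erase hmem
    exact (h1.trans h2).cons_inv
  have hT : PySem.List.sorted T (fun x => x) false = T := by
    apply PySem.List.sorted_eq_self_of_pairwise
    have := PySem.List.sorted_pairwise P (fun x => x)
    rw [hS] at this; exact this.of_cons
  rw [hS, ← hT, sortedAsc_eq_of_perm T (P.erase m) hperm]

-- the loop produces exactly the zip of the sorted prefixes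
theorem tandemLoop_eq (Q : Int) : ∀ (n : Nat) (D P : List Int) (bikes : List (Int × Int)),
    n ≤ D.length → n ≤ P.length →
    tandemLoop Q n D P bikes =
      bikes ++ ((PySem.List.sorted D (fun x => x) true).take n).zip
               ((PySem.List.sorted P (fun x => x) (decide ¬ (Q = 1))).take n) := by
  intro n
  induction n with
  | zero => intro D P bikes _ _; simp [tandemLoop]
  | succ n ih =>
    intro D P bikes hD hP
    have hDne : D ≠ [] := by intro hn; subst hn; simp at hD
    have hPne : P ≠ [] := by intro hn; subst hn; simp at hP
    obtain ⟨d, hd⟩ : ∃ d, PySem.List.max? D (fun x => x) = some d := by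
      cases hE : PySem.List.max? D (fun x => x) with
      | none => exact absurd ((PySem.List.max?_eq_none_iff _ _).mp hE) hDne
      | some d => exact ⟨d, rfl⟩
    have hdmem : d ∈ D := PySem.List.max?_mem hd
    by_cases hQ : Q = 1
    · obtain ⟨p, hp⟩ : ∃ p, PySem.List.min? P (fun x => x) = some p := by
        cases hE : PySem.List.min? P (fun x => x) with
        | none => exact absurd ((PySem.List.min?_eq_none_iff _ _).mp hE) hPne
        | some p => exact ⟨p, rfl⟩
      have hpmem : p ∈ P := PySem.List.min?_mem hp
      have hstep : tandemLoop Q (n + 1) D P bikes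
          = tandemLoop Q n (D.erase d) (P.erase p) (bikes ++ [(d, p)]) := by
        simp [tandemLoop, hQ, hd, hp, PySem.List.remove?_eq_some_erase D d hdmem,
          PySem.List.remove?_eq_some_erase P p hpmem]
      rw [hstep, ih (D.erase d) (P.erase p) (bikes ++ [(d, p)])
          (by rw [List.length_erase_of_mem hdmem]; omega)
          (by rw [List.length_erase_of_mem hpmem]; omega)]
      rw [desc_head D d hd,
        show (decide (¬ (Q = 1))) = false from decide_eq_false (not_not_intro hQ),
        asc_head P p hp]
      simp
    · obtain ⟨p, hp⟩ : ∃ p, PySem.List.max? P (fun x => x) = some p := by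
        cases hE : PySem.List.max? P (fun x => x) with
        | none => exact absurd ((PySem.List.max?_eq_none_iff _ _).mp hE) hPne
        | some p => exact ⟨p, rfl⟩
      have hpmem : p ∈ P := PySem.List.max?_mem hp
      have hstep : tandemLoop Q (n + 1) D P bikes
          = tandemLoop Q n (D.erase d) (P.erase p) (bikes ++ [(d, p)]) := by
        simp [tandemLoop, hQ, hd, hp, PySem.List.remove?_eq_some_erase D d hdmem,
          PySem.List.remove?_eq_some_erase P p hpmem]
      rw [hstep, ih (D.erase d) (P.erase p) (bikes ++ [(d, p)])
          (by rw [List.length_erase_of_mem hdmem]; omega)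
          (by rw [List.length_erase_of_mem hpmem]; omega)]
      rw [desc_head D d hd,
        show (decide (¬ (Q = 1))) = true from decide_eq_true hQ,
        desc_head P p hp]
      simp

theorem foldl_max_sum (l : List (Int × Int)) : ∀ acc : Int,
    l.foldl (fun acc b => acc + max b.1 b.2) acc
      = acc + (l.map (fun dp => max dp.1 dp.2)).sum := by
  induction l with
  | nil => intro acc; simp
  | cons x t ih => intro acc; simp [List.foldl_cons, ih, add_assoc]

-- ===== VERDICT (by name: the statement is the Claim_ definition above) =====
theorem tandem_spec : Claim_equal_tandem := by
  intro Q N D P _ hPre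
  obtain ⟨hND, hNP⟩ := hPre
  have hD' : N.toNat ≤ D.length := by omega
  have hP' : N.toNat ≤ P.length := by omega
  unfold Spec_tandem tandem tandem_alt
  rw [show max N 0 = ((N.toNat : Nat) : Int) from by omega]
  simp only [PySem.List.slice_to_natCast, tandemLoop_eq Q N.toNat D P [] hD' hP',
    foldl_max_sum, List.nil_append, zero_add]
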